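-- pv_equiv track=rewrite | github.com/mccoach/chantheory | backend/services/task_events.py | _summarize_overall_status
-- ===== SOURCE A (Python) =====
-- from typing import Dict, Any, Optional, Tuple
--
-- _ALLOWED_JOB_STATUS = {"success", "failed", "cancelled", "skipped"}
--
-- def _safe_job_status(value: str) -> str:
--     v = (value or "").strip().lower()
--     return v if v in _ALLOWED_JOB_STATUS else "failed"
--
-- def _summarize_overall_status(job_status_map: Dict[str, str]) -> str:
--     if not job_status_map:
--         return "failed"
--
--     statuses = [str(s).strip().lower() for s in job_status_map.values()]
--     statuses = [_safe_job_status(s) for s in statuses]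
--
--     if any(s == "cancelled" for s in statuses):
--         return "cancelled"
--
--     succ = sum(1 for s in statuses if s == "success")
--     fail = sum(1 for s in statuses if s == "failed")
--     skip = sum(1 for s in statuses if s == "skipped")
--
--     if skip and not succ and not fail:
--         return "skipped"
--     if fail and succ:
--         return "partial_fail"
--     if fail and not succ:
--         return "failed"
--     return "success"
-- ===== SOURCE B (Python) =====
-- # B: single-pass bitwise-OR mask accumulator + table decode, instead of A's list build,
-- # any-scan, three counting sums and a branch cascade.
-- _CODE = {"success": 1, "failed": 2, "cancelled": 4, "skipped": 0}
--
--
-- def _summarize_overall_status(job_status_map):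
--     if not job_status_map:
--         return "failed"
--     mask = 0
--     for s in job_status_map.values():
--         mask |= _CODE.get(str(s).strip().lower(), 2)  # unknown/empty -> failed bit
--     if mask & 4:
--         return "cancelled"
--     return ("skipped", "success", "failed", "partial_fail")[mask]
-- ===== Notes on version B (the rewrite author's own statement) =====
-- stated objective: alternative
-- what changed: Replaces A's normalized status list with its four scans (any-cancelled plus three counting sums) and branch cascade by a single pass OR-ing per-status bit codes (success=1, failed=2, cancelled=4, skipped=0, unknown->2) into an integer mask, then decoding the verdict with a bit test and an indexed lookup table.
import Mathlib
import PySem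

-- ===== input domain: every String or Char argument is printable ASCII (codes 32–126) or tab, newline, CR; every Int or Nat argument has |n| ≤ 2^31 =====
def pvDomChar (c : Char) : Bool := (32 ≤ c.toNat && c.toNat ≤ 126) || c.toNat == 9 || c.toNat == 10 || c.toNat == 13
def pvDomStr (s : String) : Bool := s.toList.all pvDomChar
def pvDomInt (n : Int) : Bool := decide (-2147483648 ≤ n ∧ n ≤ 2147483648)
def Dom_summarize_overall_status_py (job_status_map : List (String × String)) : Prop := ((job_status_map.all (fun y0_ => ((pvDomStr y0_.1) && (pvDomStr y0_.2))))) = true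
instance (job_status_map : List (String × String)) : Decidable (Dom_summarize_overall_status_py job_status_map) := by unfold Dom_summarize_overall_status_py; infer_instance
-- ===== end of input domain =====

-- B replaces A's normalized list, any-scan, three counting sums and branch cascade by a
-- single pass OR-ing per-status bit codes into a mask, decoded by a lookup table (alternative).

-- ===== PORT A =====
-- _ALLOWED_JOB_STATUS
def pvAllowed : List String := ["success", "failed", "cancelled", "skipped"]

-- _safe_job_status (helper of A, as in the Python module)
def safe_job_status_py (value : String) : String :=
  let v := PySem.Str.lower (PySem.Str.strip (if value = "" then "" else value))
  if pvAllowed.contains v then v else "failed"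

def summarize_overall_status_py (job_status_map : List (String × String)) : String :=
  let d := PySem.Dict.ofList job_status_map
  if d.items = [] then "failed"
  else
    let statuses := d.values.map (fun s => PySem.Str.lower (PySem.Str.strip s))
    let statuses := statuses.map safe_job_status_py
    if statuses.any (fun s => s == "cancelled") then "cancelled"
    else
      let succ : Int := (statuses.countP (fun s => s == "success") : Int)
      let fail : Int := (statuses.countP (fun s => s == "failed") : Int)
      let skip : Int := (statuses.countP (fun s => s == "skipped") : Int)
      if skip ≠ 0 ∧ succ = 0 ∧ fail = 0 then "skipped"
      else if fail ≠ 0 ∧ succ ≠ 0 then "partial_fail"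
      else if fail ≠ 0 ∧ succ = 0 then "failed"
      else "success"

-- ===== PORT B =====
-- _CODE
def pvCodeDict : PySem.Dict String Nat :=
  PySem.Dict.ofList [("success", 1), ("failed", 2), ("cancelled", 4), ("skipped", 0)]

def summarize_overall_status_py_alt (job_status_map : List (String × String)) : String :=
  let d := PySem.Dict.ofList job_status_map
  if d.items = [] then "failed"
  else
    let mask : Nat := d.values.foldl
      (fun acc s => acc ||| PySem.Dict.getD pvCodeDict (PySem.Str.lower (PySem.Str.strip s)) 2) 0
    if mask &&& 4 ≠ 0 then "cancelled"
    else
      -- tuple index: mask ≤ 3 here, so the index is always in range; .getD only totalizes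
      (PySem.List.pyGet? ["skipped", "success", "failed", "partial_fail"] (mask : Int)).getD "failed"

-- ===== PRECONDITION & SPEC =====
def Spec_summarize_overall_status_py (job_status_map : List (String × String)) (out : String) : Prop := out = summarize_overall_status_py_alt job_status_map
instance (job_status_map : List (String × String)) (out : String) : Decidable (Spec_summarize_overall_status_py job_status_map out) := by unfold Spec_summarize_overall_status_py; infer_instance

-- ===== CLAIM (what is proved, stated in full; the proofs are below) =====
def Claim_equal_summarize_overall_status_py : Prop := ∀ (job_status_map : List (String × String)), Dom_summarize_overall_status_py job_status_map → Spec_summarize_overall_status_py job_status_map (summarize_overall_status_py job_status_map)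

-- ===== LEMMAS AND PROOFS =====

theorem pv_isupper_eq (c : Char) : PySem.Chars.isupper c = (decide (65 ≤ c.toNat) && decide (c.toNat ≤ 90)) := rfl

theorem pv_toNat_shift (c : Char) (h1 : 65 ≤ c.toNat) (h2 : c.toNat ≤ 90) :
    (Char.ofNat (c.toNat + 32)).toNat = c.toNat + 32 := by
  rw [Char.toNat_ofNat]
  have : (c.toNat + 32).isValidChar := Or.inl (by omega)
  simp [this]

theorem pv_lowerChar_of_upper (c : Char) (h1 : 65 ≤ c.toNat) (h2 : c.toNat ≤ 90) :
    PySem.Chars.lowerChar c = Char.ofNat (c.toNat + 32) := by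
  rw [PySem.Chars.lowerChar, pv_isupper_eq]; simp [h1, h2]

theorem pv_lowerChar_of_not_upper (c : Char) (h : ¬ (65 ≤ c.toNat ∧ c.toNat ≤ 90)) :
    PySem.Chars.lowerChar c = c := by
  rw [PySem.Chars.lowerChar, pv_isupper_eq]
  rcases Decidable.not_and_iff_not_or_not.mp h with h' | h' <;> simp [h']

theorem pv_isspace_false (a : Char) (h1 : 65 ≤ a.toNat) (h2 : a.toNat ≤ 122) :
    PySem.Chars.isspace a = false := by
  simp only [PySem.Chars.isspace, Bool.or_eq_false_iff, Bool.and_eq_false_iff,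
    decide_eq_false_iff_not]
  omega

theorem pv_isspace_lowerChar (c : Char) :
    PySem.Chars.isspace (PySem.Chars.lowerChar c) = PySem.Chars.isspace c := by
  by_cases h : 65 ≤ c.toNat ∧ c.toNat ≤ 90
  · rw [pv_lowerChar_of_upper c h.1 h.2]
    have hv := pv_toNat_shift c h.1 h.2
    rw [pv_isspace_false _ (by omega) (by omega), pv_isspace_false _ (by omega) (by omega)]
  · rw [pv_lowerChar_of_not_upper c h]

theorem pv_lowerChar_idem (c : Char) :
    PySem.Chars.lowerChar (PySem.Chars.lowerChar c) = PySem.Chars.lowerChar c := by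
  by_cases h : 65 ≤ c.toNat ∧ c.toNat ≤ 90
  · rw [pv_lowerChar_of_upper c h.1 h.2]
    have hv := pv_toNat_shift c h.1 h.2
    exact pv_lowerChar_of_not_upper _ (by omega)
  · rw [pv_lowerChar_of_not_upper c h]; exact pv_lowerChar_of_not_upper c h

theorem pv_lower_idem (l : List Char) :
    PySem.Chars.lower (PySem.Chars.lower l) = PySem.Chars.lower l := by
  simp [PySem.Chars.lower, List.map_map, Function.comp_def, pv_lowerChar_idem]

theorem pv_comp_isspace :
    (PySem.Chars.isspace ∘ PySem.Chars.lowerChar) = PySem.Chars.isspace :=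
  funext pv_isspace_lowerChar

theorem pv_lstrip_lower (l : List Char) :
    PySem.Chars.lstrip (PySem.Chars.lower l) = PySem.Chars.lower (PySem.Chars.lstrip l) := by
  simp only [PySem.Chars.lstrip, PySem.Chars.lower, List.dropWhile_map, pv_comp_isspace]

theorem pv_rstrip_lower (l : List Char) :
    PySem.Chars.rstrip (PySem.Chars.lower l) = PySem.Chars.lower (PySem.Chars.rstrip l) := by
  simp only [PySem.Chars.rstrip, PySem.Chars.lower, ← List.map_reverse, List.dropWhile_map,
    pv_comp_isspace]

theorem pv_strip_lower (l : List Char) :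
    PySem.Chars.strip (PySem.Chars.lower l) = PySem.Chars.lower (PySem.Chars.strip l) := by
  simp only [PySem.Chars.strip, pv_lstrip_lower, pv_rstrip_lower]

theorem pv_dropWhile_prefix (p : Char → Bool) {l l' : List Char}
    (h : l.dropWhile p = l) (hp : l' <+: l) : l'.dropWhile p = l' := by
  cases l' with
  | nil => rfl
  | cons a t =>
    obtain ⟨r, hr⟩ := hp
    subst hr
    simp only [List.cons_append, List.dropWhile_cons] at h ⊢
    cases hpa : p a with
    | false => simp
    | true =>
      rw [hpa] at h
      simp only [if_true] at h
      have hle := List.length_dropWhile_le p (t ++ r)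
      have hlen := congrArg List.length h
      simp only [List.length_cons, List.length_append] at hle hlen
      omega

theorem pv_rstrip_prefix (l : List Char) : PySem.Chars.rstrip l <+: l := by
  have hs := List.dropWhile_suffix (l := l.reverse) PySem.Chars.isspace
  have : (List.dropWhile PySem.Chars.isspace l.reverse).reverse <+: l.reverse.reverse :=
    List.reverse_prefix.mpr (by simpa using hs)
  simpa [PySem.Chars.rstrip] using this

theorem pv_rstrip_idem (l : List Char) :
    PySem.Chars.rstrip (PySem.Chars.rstrip l) = PySem.Chars.rstrip l := by
  simp [PySem.Chars.rstrip, List.dropWhile_idempotent]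

theorem pv_strip_idem (l : List Char) :
    PySem.Chars.strip (PySem.Chars.strip l) = PySem.Chars.strip l := by
  have hu : (PySem.Chars.lstrip l).dropWhile PySem.Chars.isspace = PySem.Chars.lstrip l := by
    simp [PySem.Chars.lstrip, List.dropWhile_idempotent]
  have h1 : PySem.Chars.lstrip (PySem.Chars.rstrip (PySem.Chars.lstrip l))
      = PySem.Chars.rstrip (PySem.Chars.lstrip l) :=
    pv_dropWhile_prefix _ hu (pv_rstrip_prefix _)
  simp only [PySem.Chars.strip, h1, pv_rstrip_idem]

-- normalizing twice is normalizing once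
theorem pv_norm_norm (s : String) :
    PySem.Str.lower (PySem.Str.strip (PySem.Str.lower (PySem.Str.strip s)))
      = PySem.Str.lower (PySem.Str.strip s) := by
  simp only [PySem.Str.lower, PySem.Str.strip, String.toList_ofList, pv_strip_lower,
    pv_lower_idem, pv_strip_idem]

-- A's element on the already-normalized u: safe u = if u allowed then u else "failed"
theorem pv_safe_of_norm (s : String) :
    safe_job_status_py (PySem.Str.lower (PySem.Str.strip s))
      = (if pvAllowed.contains (PySem.Str.lower (PySem.Str.strip s)) then
          PySem.Str.lower (PySem.Str.strip s) else "failed") := by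
  unfold safe_job_status_py
  by_cases h1 : PySem.Str.lower (PySem.Str.strip s) = ""
  · rw [h1]; decide
  · simp only [h1, if_false, pv_norm_norm]

-- the status→bit table, as a plain function
def pvStatusCode (t : String) : Nat :=
  if t = "success" then 1 else if t = "failed" then 2
  else if t = "cancelled" then 4 else if t = "skipped" then 0 else 2

theorem pv_getD_code (u : String) : PySem.Dict.getD pvCodeDict u 2 = pvStatusCode u := by
  have h : pvCodeDict
      = PySem.Dict.mk [("success", 1), ("failed", 2), ("cancelled", 4), ("skipped", 0)] := rfl
  rw [h, PySem.Dict.getD_eq_get?_getD]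
  simp only [PySem.Dict.get?_mk_cons, pvStatusCode]
  by_cases h1 : u = "success" <;> by_cases h2 : u = "failed" <;>
    by_cases h3 : u = "cancelled" <;> by_cases h4 : u = "skipped" <;>
    · have h1' : ("success" = u) ↔ (u = "success") := eq_comm
      have h2' : ("failed" = u) ↔ (u = "failed") := eq_comm
      have h3' : ("cancelled" = u) ↔ (u = "cancelled") := eq_comm
      have h4' : ("skipped" = u) ↔ (u = "skipped") := eq_comm
      simp [PySem.Dict.get?, h1', h2', h3', h4', h1, h2, h3, h4]

-- B's per-value code equals the bit code of A's per-value safe status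
theorem pv_code_eq_code_safe (s : String) :
    PySem.Dict.getD pvCodeDict (PySem.Str.lower (PySem.Str.strip s)) 2
      = pvStatusCode (safe_job_status_py (PySem.Str.lower (PySem.Str.strip s))) := by
  rw [pv_getD_code, pv_safe_of_norm]
  generalize PySem.Str.lower (PySem.Str.strip s) = u
  by_cases h : pvAllowed.contains u
  · simp only [h, if_true]
  · simp only [h]
    have n1 : u ≠ "success" := fun e => absurd h (by rw [e]; decide)
    have n2 : u ≠ "failed" := fun e => absurd h (by rw [e]; decide)
    have n3 : u ≠ "cancelled" := fun e => absurd h (by rw [e]; decide)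
    have n4 : u ≠ "skipped" := fun e => absurd h (by rw [e]; decide)
    simp [pvStatusCode, n1, n2, n3, n4]

-- the combined mask of the three membership flags
def pvMaskOf (succ fail canc : Bool) : Nat :=
  (if succ then 1 else 0) + (if fail then 2 else 0) + (if canc then 4 else 0)

-- the OR-fold of bit codes over an all-allowed list computes the membership mask
theorem pv_foldl_mask (M : List String) (acc : Nat) (hM : ∀ m ∈ M, m ∈ pvAllowed) :
    M.foldl (fun a m => a ||| pvStatusCode m) acc
      = acc ||| pvMaskOf (M.contains "success") (M.contains "failed") (M.contains "cancelled") := by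
  induction M generalizing acc with
  | nil => simp [pvMaskOf]
  | cons m t ih =>
    have hm : m ∈ pvAllowed := hM m (List.mem_cons_self)
    have ht : ∀ x ∈ t, x ∈ pvAllowed := fun x hx => hM x (List.mem_cons_of_mem m hx)
    rw [List.foldl_cons, ih _ ht, Nat.or_assoc]
    congr 1
    fin_cases hm <;>
      cases h1 : t.contains "success" <;> cases h2 : t.contains "failed" <;>
      cases h3 : t.contains "cancelled" <;>
      simp only [List.contains_cons, h1, h2, h3] <;> decide

-- count is zero iff not a member (on Int)
theorem pv_count_zero (M : List String) (y : String) :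
    ((M.countP (fun s => s == y) : Int) = 0) ↔ y ∉ M := by
  rw [Int.natCast_eq_zero, List.countP_eq_zero]
  constructor
  · intro h hy
    exact absurd (beq_self_eq_true y) (by simpa using h y hy)
  · intro h s hs he
    exact h ((beq_iff_eq.mp he) ▸ hs)

theorem pv_any_eq (M : List String) :
    (M.any fun s => s == "cancelled") = M.contains "cancelled" := by
  apply Bool.eq_iff_iff.mpr
  rw [List.any_eq_true, List.contains_eq_mem, decide_eq_true_eq]
  constructor
  · rintro ⟨x, hx, he⟩
    exact (beq_iff_eq.mp he) ▸ hx
  · intro h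
    exact ⟨_, h, beq_self_eq_true _⟩

-- both non-empty branches agree for an arbitrary list of values V
set_option maxHeartbeats 1000000 in
theorem pv_core (V : List String) (hne : V ≠ []) :
    (let statuses := (V.map (fun s => PySem.Str.lower (PySem.Str.strip s))).map safe_job_status_py
     if statuses.any (fun s => s == "cancelled") then "cancelled"
     else
       let succ : Int := (statuses.countP (fun s => s == "success") : Int)
       let fail : Int := (statuses.countP (fun s => s == "failed") : Int)
       let skip : Int := (statuses.countP (fun s => s == "skipped") : Int)
       if skip ≠ 0 ∧ succ = 0 ∧ fail = 0 then "skipped"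
       else if fail ≠ 0 ∧ succ ≠ 0 then "partial_fail"
       else if fail ≠ 0 ∧ succ = 0 then "failed"
       else "success")
    = (let mask : Nat := V.foldl
         (fun acc s => acc ||| PySem.Dict.getD pvCodeDict (PySem.Str.lower (PySem.Str.strip s)) 2) 0
       if mask &&& 4 ≠ 0 then "cancelled"
       else (PySem.List.pyGet? ["skipped", "success", "failed", "partial_fail"] (mask : Int)).getD "failed") := by
  simp only
  set M := (V.map (fun s => PySem.Str.lower (PySem.Str.strip s))).map safe_job_status_py with hM
  have hall : ∀ m ∈ M, m ∈ pvAllowed := by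
    intro m hm
    rw [hM] at hm
    simp only [List.map_map, List.mem_map, Function.comp_def] at hm
    obtain ⟨s, _, rfl⟩ := hm
    rw [pv_safe_of_norm]
    split
    · exact List.mem_of_elem_eq_true (by assumption)
    · decide
  have hfold : V.foldl
      (fun acc s => acc ||| PySem.Dict.getD pvCodeDict (PySem.Str.lower (PySem.Str.strip s)) 2) 0
      = pvMaskOf (M.contains "success") (M.contains "failed") (M.contains "cancelled") := by
    have hfun : (fun (acc : Nat) s => acc ||| PySem.Dict.getD pvCodeDict (PySem.Str.lower (PySem.Str.strip s)) 2)
        = (fun (acc : Nat) s => acc ||| pvStatusCode (safe_job_status_py (PySem.Str.lower (PySem.Str.strip s)))) := by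
      funext a s
      rw [pv_code_eq_code_safe]
    have h1 : V.foldl
        (fun acc s => acc ||| PySem.Dict.getD pvCodeDict (PySem.Str.lower (PySem.Str.strip s)) 2) 0
        = M.foldl (fun a m => a ||| pvStatusCode m) 0 := by
      rw [hfun, hM, List.foldl_map, List.foldl_map]
    rw [h1, pv_foldl_mask M 0 hall, Nat.zero_or]
  have hMne : M ≠ [] := by
    rw [hM]
    simp [hne]
  rw [hfold, pv_any_eq]
  have hcnt : ∀ y : String,
      (((M.countP (fun s => s == y)) : Int) = 0) ↔ (M.contains y = false) := by
    intro y
    rw [pv_count_zero, List.contains_eq_mem]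
    simp
  cases hc : M.contains "cancelled" <;> cases hs : M.contains "success" <;>
    cases hf : M.contains "failed" <;> cases hk : M.contains "skipped" <;>
    simp only [ne_eq, hcnt, hs, hf, hk, pvMaskOf] <;>
    first
    | decide
    | (obtain ⟨m, hmem⟩ := List.exists_mem_of_ne_nil M hMne
       have hm := hall m hmem
       simp only [List.contains_eq_mem, decide_eq_false_iff_not] at hc hs hf hk
       fin_cases hm
       · exact absurd hmem hs
       · exact absurd hmem hf
       · exact absurd hmem hc
       · exact absurd hmem hk)

-- ===== VERDICT (by name: the statement is the Claim_ definition above) =====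
theorem summarize_overall_status_py_spec : Claim_equal_summarize_overall_status_py := by
  intro m _
  unfold Spec_summarize_overall_status_py
  unfold summarize_overall_status_py summarize_overall_status_py_alt
  by_cases hE : (PySem.Dict.ofList m).items = []
  · simp [hE]
  · simp only [hE, if_false]
    exact pv_core (PySem.Dict.ofList m).values
      (by simpa [PySem.Dict.values, List.map_eq_nil_iff] using hE)
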